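-- pv_equiv track=rewrite | github.com/johink/Practice-Scripts | Random/binsearch.py | find
-- ===== SOURCE A (Python) =====
-- def find(array, findlist):
--     """
--     Implementation of iterative binary search algorithm
--     """
--     results = []
--     for item in findlist:
--         lb = 0
--         ub = len(array) - 1
--         i = (lb + ub + 1) // 2
--         #While the lower and upper bounds haven't crossed and we haven't found our item
--         while  lb <= ub and array[i] != item:
--             #Toss the appropriate half of the array
--             if item < array[i]:
--                 ub = i - 1
--             else:
--                 lb = i + 1
--             i = (lb + ub + 1) // 2
--         #Check if we're in the array to avoid out-of-bounds error
--         if 0 <= i < len(array) and array[i] == item: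
--             results.append(i)
--         else:
--             results.append(-1)
--     return " ".join([str(num) for num in results])
-- ===== SOURCE B (Python) =====
-- def find(array, findlist):
--     """Binary search reformulated over (lower bound, window width) in nonnegative arithmetic."""
--     n = len(array)
--
--     def locate(item, lb, w):
--         if w <= 0:
--             return lb
--         i = lb + w // 2
--         v = array[i]
--         if v == item:
--             return i
--         if item < v:
--             return locate(item, lb, w // 2)
--         return locate(item, i + 1, w - w // 2 - 1)
--
--     def result(item):
--         r = locate(item, 0, n)
--         return str(r) if r < n and array[r] == item else "-1"
--
--     return " ".join(result(item) for item in findlist)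
-- ===== Notes on version B (the rewrite author's own statement) =====
-- stated objective: alternative
-- what changed: Reformulates the binary search over the state (lower bound, window width) in purely nonnegative natural-number arithmetic (midpoint lb + w//2, recursing with widths w//2 and w-w//2-1) instead of A's iterative (lb, ub) signed-bounds loop, and builds each result string directly in a per-item function joined at the end instead of accumulating an int list and stringifying it.
import Mathlib
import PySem

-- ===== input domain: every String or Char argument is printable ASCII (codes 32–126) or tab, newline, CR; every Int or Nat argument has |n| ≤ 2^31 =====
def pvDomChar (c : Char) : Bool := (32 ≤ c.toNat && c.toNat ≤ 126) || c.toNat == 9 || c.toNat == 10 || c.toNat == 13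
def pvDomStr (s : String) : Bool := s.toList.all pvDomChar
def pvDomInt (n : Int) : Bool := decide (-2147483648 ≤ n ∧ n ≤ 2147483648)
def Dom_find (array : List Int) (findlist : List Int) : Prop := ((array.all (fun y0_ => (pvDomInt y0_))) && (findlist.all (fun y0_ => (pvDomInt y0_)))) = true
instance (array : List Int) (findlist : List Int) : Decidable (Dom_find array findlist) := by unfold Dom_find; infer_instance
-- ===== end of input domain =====

-- B reformulates A's signed (lb, ub) binary-search loop as a recursion on the nonnegative state
-- (lower bound, window width) with midpoint lb + w/2, producing each result string directly;
-- objective: alternative decomposition, same behaviour.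

-- ===== PORT A =====
-- A's while loop: i is recomputed from (lb, ub) before the loop and after each bound update,
-- so the loop is this recursion on (lb, ub) with i computed at the head. array[i] is always in
-- range on states A reaches from its initial bounds, so the 'none' (IndexError) arm is unreachable there.
def findLoopA (array : List Int) (item : Int) (lb ub : Int) : Int :=
  let i := PySem.Int.floordiv (lb + ub + 1) 2
  if lb ≤ ub then
    match PySem.List.pyGet? array i with
    | some v =>
      if v ≠ item then
        if item < v then findLoopA array item lb (i - 1)
        else findLoopA array item (i + 1) ub
      else i
    | none => i
  else i
termination_by (ub - lb + 1).toNat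
decreasing_by
  all_goals
    simp only [PySem.Int.floordiv_eq_ediv_of_pos (by norm_num : (0:Int) < 2)] at *
    omega

def find (array : List Int) (findlist : List Int) : String :=
  let results := findlist.foldl
    (fun acc item =>
      let i := findLoopA array item 0 ((array.length : Int) - 1)
      if 0 ≤ i ∧ i < (array.length : Int) ∧ PySem.List.pyGet? array i = some item then
        acc ++ [i]
      else
        acc ++ [-1]) ([] : List Int)
  PySem.Str.join " " (results.map PySem.Int.toStr)

-- ===== PORT B =====
-- literal port of Source B's locate(item, lb, w), recursing on the window width w (a Nat).
-- Source B's array[i] is ported as getD: every call from find_alt keeps lb + w ≤ array.length,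
-- so i = lb + w/2 < array.length whenever w > 0 and the access is exact (never an IndexError).
def locateB (array : List Int) (item : Int) (lb w : Nat) : Nat :=
  if w = 0 then lb
  else
    let i := lb + w / 2
    let v := array.getD i 0
    if v = item then i
    else if item < v then locateB array item lb (w / 2)
    else locateB array item (i + 1) (w - w / 2 - 1)
termination_by w
decreasing_by all_goals omega

def resultB (array : List Int) (item : Int) : String :=
  let r := locateB array item 0 array.length
  if r < array.length ∧ array.getD r 0 = item then PySem.Int.toStr (r : Int) else "-1"

def find_alt (array : List Int) (findlist : List Int) : String :=
  PySem.Str.join " " (findlist.map (resultB array))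

-- ===== PRECONDITION & SPEC =====
def Spec_find (array : List Int) (findlist : List Int) (out : String) : Prop := out = find_alt array findlist
instance (array : List Int) (findlist : List Int) (out : String) : Decidable (Spec_find array findlist out) := by unfold Spec_find; infer_instance

-- ===== CLAIM (what is proved, stated in full; the proofs are below) =====
def Claim_equal_find : Prop := ∀ (array : List Int) (findlist : List Int), Dom_find array findlist → Spec_find array findlist (find array findlist)

-- ===== LEMMAS AND PROOFS =====

-- A's loop on bounds (lb, lb + w - 1) lands on the same index as B's recursion on (lb, w),
-- for every window contained in the array (strong induction on the width w).
theorem loopA_eq_locateB (array : List Int) (item : Int) :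
    ∀ (w lb : Nat), lb + w ≤ array.length →
    findLoopA array item (lb : Int) ((lb : Int) + (w : Int) - 1) = (locateB array item lb w : Int) := by
  intro w
  induction w using Nat.strong_induction_on with
  | _ w ih =>
    intro lb hw
    rw [findLoopA, locateB]
    have hmid : PySem.Int.floordiv ((lb : Int) + ((lb : Int) + (w : Int) - 1) + 1) 2
        = (lb : Int) + ((w / 2 : Nat) : Int) := by
      rw [PySem.Int.floordiv_eq_ediv_of_pos (by norm_num : (0:Int) < 2)]
      omega
    by_cases hw0 : w = 0
    · subst hw0
      simp only [hmid]
      norm_num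
    · have hle : (lb : Int) ≤ (lb : Int) + (w : Int) - 1 := by omega
      have hi : lb + w / 2 < array.length := by omega
      have hget : PySem.List.pyGet? array ((lb : Int) + ((w / 2 : Nat) : Int))
          = some (array.getD (lb + w / 2) 0) := by
        have : (lb : Int) + ((w / 2 : Nat) : Int) = ((lb + w / 2 : Nat) : Int) := by push_cast; ring
        rw [this, PySem.List.pyGet?_natCast, List.getElem?_eq_getElem hi, List.getD_eq_getElem _ _ hi]
      simp only [hmid, if_pos hle, hget, if_neg hw0]
      set v := array.getD (lb + w / 2) 0 with hv
      by_cases hvi : v = item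
      · simp [hvi]
      · by_cases hlt : item < v
        · have h1 := ih (w / 2) (by omega) lb (by omega)
          simp only [hvi, hlt, ite_false, ne_eq, not_false_iff, if_true]
          simpa using h1
        · have h2 := ih (w - w / 2 - 1) (by omega) (lb + w / 2 + 1) (by omega)
          simp only [hvi, hlt, ite_false, ne_eq, not_false_iff, if_true]
          have ea : ((lb + w / 2 + 1 : Nat) : Int) = (lb : Int) + ((w / 2 : Nat) : Int) + 1 := by
            push_cast; ring
          rw [ea] at h2
          have eb : (lb : Int) + ((w / 2 : Nat) : Int) + 1 + ((w - w / 2 - 1 : Nat) : Int) - 1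
              = (lb : Int) + (w : Int) - 1 := by omega
          rw [eb] at h2
          exact h2

-- the per-item results agree
theorem item_eq (array : List Int) (item : Int) :
    (let i := findLoopA array item 0 ((array.length : Int) - 1)
     if 0 ≤ i ∧ i < (array.length : Int) ∧ PySem.List.pyGet? array i = some item then i else -1)
    = (let r := locateB array item 0 array.length
       if r < array.length ∧ array.getD r 0 = item then (r : Int) else -1) := by
  have h := loopA_eq_locateB array item array.length 0 (by omega)
  simp only [Nat.cast_zero, zero_add] at h
  simp only [h]
  set r := locateB array item 0 array.length with hr
  by_cases hlt : r < array.length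
  · have hget : PySem.List.pyGet? array (r : Int) = some (array.getD r 0) := by
      rw [PySem.List.pyGet?_natCast, List.getElem?_eq_getElem hlt, List.getD_eq_getElem _ _ hlt]
    simp only [hget]
    by_cases hv : array.getD r 0 = item
    · simp [hlt]
    · simp
  · have hnone : PySem.List.pyGet? array (r : Int) = none := by
      rw [PySem.List.pyGet?_natCast]
      exact List.getElem?_eq_none (by omega)
    simp [hlt, hnone]

-- A's foldl accumulation of the results list is the corresponding map
theorem foldl_results (array : List Int) (findlist : List Int) (acc : List Int) :
    findlist.foldl
      (fun acc item =>
        let i := findLoopA array item 0 ((array.length : Int) - 1)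
        if 0 ≤ i ∧ i < (array.length : Int) ∧ PySem.List.pyGet? array i = some item then
          acc ++ [i]
        else
          acc ++ [-1]) acc
    = acc ++ findlist.map (fun item =>
        let i := findLoopA array item 0 ((array.length : Int) - 1)
        if 0 ≤ i ∧ i < (array.length : Int) ∧ PySem.List.pyGet? array i = some item then i else -1) := by
  induction findlist generalizing acc with
  | nil => simp
  | cons x xs ih =>
    simp only [List.foldl_cons, List.map_cons]
    rw [ih]
    split <;> simp

theorem toStr_neg_one : PySem.Int.toStr (-1) = "-1" := by decide

-- ===== VERDICT (by name: the statement is the Claim_ definition above) =====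
theorem find_spec : Claim_equal_find := by
  intro array findlist _
  unfold Spec_find find find_alt
  rw [foldl_results]
  simp only [List.nil_append, List.map_map]
  congr 1
  apply List.map_congr_left
  intro item _
  have h := item_eq array item
  simp only at h
  simp only [Function.comp_apply, h, resultB]
  split <;> simp [toStr_neg_one]
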